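-- pv_equiv track=rewrite | github.com/microsoft/FEA-Bench | feabench/collect/utils.py | has_attribute_or_import_error
-- ===== SOURCE A (Python) =====
-- def has_attribute_or_import_error(log_before):
--     """
--     Check to see if Attribute/Import-prefix is in log text
--
--     Args:
--         log_before (str): Validation log text before patch application
--     """
--     log_before = log_before.lower()
--
--     if any([x in log_before for x in ['attribute', 'import']]):
--         def get_lines_with_word(text, target_word):
--             # Function to extract line(s) that contains target_word
--             text, target_word = text.lower(), target_word.lower()
--             lines, hits = text.split('\n')[::-1], []
--             for line in lines:
--                 if target_word in line:
--                     hits.append(line)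
--             return hits
--
--         # Get line with Attribute/Import error
--         lines_1 = get_lines_with_word(log_before, 'attribute')
--         lines_2 = get_lines_with_word(log_before, 'import')
--         lines_1 = " ".join(lines_1)
--         lines_2 = " ".join(lines_2)
--
--         if any([(x in lines_1 or x in lines_2) for x in ['error', 'fail']]):
--             return True
--     return False
-- ===== SOURCE B (Python) =====
-- def has_attribute_or_import_error(log_before):
--     """
--     Check to see if Attribute/Import-prefix is in log text
--
--     Args:
--         log_before (str): Validation log text before patch application
--     """
--     log = log_before.lower()
--     for line in log.split('\n'):
--         if ('attribute' in line or 'import' in line) and ('error' in line or 'fail' in line):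
--             return True
--     return False
-- ===== Notes on version B (the rewrite author's own statement) =====
-- stated objective: simpler
-- what changed: Replaces the helper that builds two reversed filtered line lists and joins each with spaces for substring checks by a single pass over the split lines with one fused per-line predicate (attribute/import AND error/fail), returning on the first hit.
import Mathlib
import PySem

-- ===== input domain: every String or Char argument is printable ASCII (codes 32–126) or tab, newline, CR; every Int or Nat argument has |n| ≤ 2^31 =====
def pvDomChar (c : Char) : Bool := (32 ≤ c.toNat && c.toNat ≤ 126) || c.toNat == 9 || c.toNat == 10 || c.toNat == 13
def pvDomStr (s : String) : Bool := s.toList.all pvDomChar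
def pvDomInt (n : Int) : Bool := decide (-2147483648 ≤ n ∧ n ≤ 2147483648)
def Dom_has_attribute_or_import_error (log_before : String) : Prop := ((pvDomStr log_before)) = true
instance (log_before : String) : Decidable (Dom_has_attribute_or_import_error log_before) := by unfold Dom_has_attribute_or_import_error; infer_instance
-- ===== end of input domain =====

-- B replaces A's helper (two reversed filtered line lists, each joined with spaces and searched) by a
-- single pass over the split lines with one fused per-line predicate; objective: simpler.

-- ===== PORT A =====
-- helper: A's inner 'get_lines_with_word' ('[::-1]' has step -1 ≠ 0, so slice? is never none)
def pvGetLinesWithWord (text target : List Char) : List (List Char) :=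
  let text := PySem.Chars.lower text
  let target := PySem.Chars.lower target
  let lines := (PySem.List.slice? (PySem.Chars.splitOn text ['\n']) none none (-1)).getD []
  lines.foldl (fun hits line => if PySem.Chars.isIn target line then hits ++ [line] else hits) []

def has_attribute_or_import_error (log_before : String) : Bool :=
  let log := PySem.Chars.lower log_before.toList
  if ([PySem.Chars.isIn "attribute".toList log, PySem.Chars.isIn "import".toList log].any id) then
    let lines_1 := pvGetLinesWithWord log "attribute".toList
    let lines_2 := pvGetLinesWithWord log "import".toList
    let lines_1 := PySem.Chars.join " ".toList lines_1
    let lines_2 := PySem.Chars.join " ".toList lines_2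
    if (["error".toList, "fail".toList].map
        (fun x => PySem.Chars.isIn x lines_1 || PySem.Chars.isIn x lines_2)).any id then
      true
    else false
  else false

-- ===== PORT B =====
def has_attribute_or_import_error_alt (log_before : String) : Bool :=
  let log := PySem.Chars.lower log_before.toList
  (PySem.Chars.splitOn log ['\n']).any (fun line =>
    (PySem.Chars.isIn "attribute".toList line || PySem.Chars.isIn "import".toList line) &&
    (PySem.Chars.isIn "error".toList line || PySem.Chars.isIn "fail".toList line))

-- ===== PRECONDITION & SPEC =====
def Spec_has_attribute_or_import_error (log_before : String) (out : Bool) : Prop := out = has_attribute_or_import_error_alt log_before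
instance (log_before : String) (out : Bool) : Decidable (Spec_has_attribute_or_import_error log_before out) := by unfold Spec_has_attribute_or_import_error; infer_instance

-- ===== CLAIM (what is proved, stated in full; the proofs are below) =====
def Claim_equal_has_attribute_or_import_error : Prop := ∀ (log_before : String), Dom_has_attribute_or_import_error log_before → Spec_has_attribute_or_import_error log_before (has_attribute_or_import_error log_before)

-- ===== LEMMAS AND PROOFS =====

-- lower is idempotent
theorem pvLowerChar_idem (c : Char) :
    PySem.Chars.lowerChar (PySem.Chars.lowerChar c) = PySem.Chars.lowerChar c := by
  have key : ∀ d : Char, PySem.Chars.isupper d = false → PySem.Chars.lowerChar d = d := by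
    intro d hd
    rw [PySem.Chars.lowerChar, if_neg (by simp [hd])]
  by_cases h : PySem.Chars.isupper c = true
  · have hlc : PySem.Chars.lowerChar c = Char.ofNat (c.toNat + 32) := by
      rw [PySem.Chars.lowerChar, if_pos h]
    simp only [PySem.Chars.isupper, Bool.and_eq_true, decide_eq_true_eq] at h
    have h65 : 65 ≤ c.toNat := by have := h.1; rw [Char.le_def] at this; exact this
    have h90 : c.toNat ≤ 90 := by have := h.2; rw [Char.le_def] at this; exact this
    have hv : (c.toNat + 32).isValidChar := by left; omega
    have htn : (Char.ofNat (c.toNat + 32)).toNat = c.toNat + 32 := by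
      rw [Char.toNat_ofNat, if_pos hv]
    have hZ : ¬ (Char.ofNat (c.toNat + 32) ≤ 'Z') := by
      rw [Char.le_def]
      intro hle
      have h2 : (Char.ofNat (c.toNat + 32)).toNat ≤ 90 := hle
      omega
    have hnotup : PySem.Chars.isupper (Char.ofNat (c.toNat + 32)) = false := by
      simp [PySem.Chars.isupper, hZ]
    rw [hlc, key _ hnotup]
  · have hf : PySem.Chars.isupper c = false := by simpa using h
    rw [key c hf, key c hf]

theorem pvLower_idem (s : List Char) :
    PySem.Chars.lower (PySem.Chars.lower s) = PySem.Chars.lower s := by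
  simp [PySem.Chars.lower, pvLowerChar_idem]

-- a simple reference recursion for splitOn on a one-char separator;
-- the first piece is cur.reverse ++ (text up to first c)
def pvSp (c : Char) : List Char → List Char → List (List Char)
  | [], cur => [cur.reverse]
  | a :: rest, cur => if a = c then cur.reverse :: pvSp c rest [] else pvSp c rest (a :: cur)

theorem pvSp_ne_nil (c : Char) (l cur : List Char) : pvSp c l cur ≠ [] := by
  induction l generalizing cur with
  | nil => simp [pvSp]
  | cons a rest ih =>
    by_cases h : a = c <;> simp [pvSp, h, ih]

theorem pvGo_eq (c : Char) (fuel : Nat) :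
    ∀ (l cur : List Char) (acc : List (List Char)), l.length ≤ fuel →
      PySem.Chars.splitOn.go [c] fuel l cur acc = acc.reverse ++ pvSp c l cur := by
  induction fuel with
  | zero =>
    intro l cur acc h
    have hl : l = [] := List.length_eq_zero_iff.mp (Nat.le_zero.mp h)
    subst hl
    simp [PySem.Chars.splitOn.go, pvSp]
  | succ n ih =>
    intro l cur acc h
    cases l with
    | nil => simp [PySem.Chars.splitOn.go, pvSp]
    | cons a rest =>
      rw [PySem.Chars.splitOn.go]
      by_cases hac : c = a
      · subst hac
        simp only [List.isPrefixOf, if_pos, BEq.rfl, Bool.true_and]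
        rw [ih _ _ _ (by simpa using Nat.le_of_succ_le_succ h)]
        simp [pvSp, List.append_assoc]
      · have hp : List.isPrefixOf [c] (a :: rest) = false := by
          simp [List.isPrefixOf, hac]
        rw [hp]
        simp only [Bool.false_eq_true, if_false]
        rw [ih _ _ _ (by simpa using Nat.le_of_succ_le_succ h)]
        simp [pvSp, Ne.symm hac]

theorem pvSplitOn_eq (c : Char) (s : List Char) :
    PySem.Chars.splitOn s [c] = pvSp c s [] := by
  rw [PySem.Chars.splitOn, pvGo_eq c (s.length + 1) s [] [] (Nat.le_succ _)]
  simp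

theorem pvJoin_sp (c : Char) (l cur : List Char) :
    PySem.Chars.join [c] (pvSp c l cur) = cur.reverse ++ l := by
  induction l generalizing cur with
  | nil => simp [pvSp, PySem.Chars.join_singleton]
  | cons a rest ih =>
    by_cases h : a = c
    · subst h
      rcases hq : pvSp a rest [] with _ | ⟨q, qs⟩
      · exact absurd hq (pvSp_ne_nil a rest [])
      · have hstep : pvSp a (a :: rest) cur = cur.reverse :: q :: qs := by
          rw [pvSp, if_pos rfl, hq]
        rw [hstep, PySem.Chars.join_cons_cons]
        have hih := ih (cur := [])
        rw [hq] at hih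
        simp only [List.reverse_nil, List.nil_append] at hih
        rw [hih]
        simp
    · have hstep : pvSp c (a :: rest) cur = pvSp c rest (a :: cur) := by
        rw [pvSp, if_neg h]
      rw [hstep, ih]
      simp

theorem pvJoin_splitOn (c : Char) (s : List Char) :
    PySem.Chars.join [c] (PySem.Chars.splitOn s [c]) = s := by
  rw [pvSplitOn_eq, pvJoin_sp]; simp

-- a word without c that is a prefix of as ++ c :: ys is a prefix of as
theorem pvPrefix_of_prefix_append_cons {c : Char} {w as ys : List Char} (hc : c ∉ w)
    (h : w <+: as ++ c :: ys) : w <+: as := by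
  rcases List.prefix_or_prefix_of_prefix h (List.prefix_append as (c :: ys)) with h1 | h1
  · exact h1
  · rcases h1 with ⟨w2, rfl⟩
    have h2 : w2 <+: c :: ys := (List.prefix_append_right_inj as).mp h
    cases w2 with
    | nil => simp
    | cons b t =>
      exfalso
      have hb : b = c := by
        rcases h2 with ⟨u, hu⟩
        simpa using congrArg (fun l => l.head?) hu
      exact hc (by simp [hb])

theorem pvInfix_append_cons_iff {c : Char} {w : List Char} (hc : c ∉ w) (hw : w ≠ [])
    (xs ys : List Char) : w <:+: xs ++ c :: ys ↔ w <:+: xs ∨ w <:+: ys := by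
  constructor
  · intro h
    induction xs with
    | nil =>
      right
      rcases h with ⟨s, t, hst⟩
      cases s with
      | nil =>
        exfalso
        cases w with
        | nil => exact hw rfl
        | cons b u =>
          have hb : b = c := by simpa using congrArg (fun l => l.head?) hst
          exact hc (by simp [hb])
      | cons b s' =>
        refine ⟨s', t, ?_⟩
        simpa using congrArg List.tail hst
    | cons x xs' ih =>
      rcases List.infix_cons_iff.mp h with h1 | h1
      · left
        have hpre : w <+: (x :: xs') ++ c :: ys := by simpa using h1
        exact (pvPrefix_of_prefix_append_cons hc hpre).isInfix
      · rcases ih h1 with h2 | h2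
        · exact Or.inl (h2.trans (List.suffix_cons x xs').isInfix)
        · exact Or.inr h2
  · rintro (h | h)
    · exact h.trans ⟨[], c :: ys, by simp⟩
    · exact h.trans ⟨xs ++ [c], [], by simp⟩

theorem pvInfix_join_iff {c : Char} {w : List Char} (hc : c ∉ w) (hw : w ≠ [])
    (parts : List (List Char)) :
    w <:+: PySem.Chars.join [c] parts ↔ ∃ p ∈ parts, w <:+: p := by
  induction parts with
  | nil =>
    rw [PySem.Chars.join_nil]
    simp [List.infix_nil, hw]
  | cons p rest ih =>
    cases rest with
    | nil => simp [PySem.Chars.join_singleton]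
    | cons q rs =>
      rw [PySem.Chars.join_cons_cons]
      rw [show p ++ [c] ++ PySem.Chars.join [c] (q :: rs) =
            p ++ c :: PySem.Chars.join [c] (q :: rs) by simp]
      rw [pvInfix_append_cons_iff hc hw, ih]
      simp

theorem pvInfix_iff_exists_line {c : Char} {w : List Char} (hc : c ∉ w) (hw : w ≠ [])
    (s : List Char) : w <:+: s ↔ ∃ p ∈ PySem.Chars.splitOn s [c], w <:+: p := by
  conv_lhs => rw [← pvJoin_splitOn c s]
  exact pvInfix_join_iff hc hw _

-- A's filtering loop is List.filter
theorem pvFoldl_filter (p : List Char → Bool) (l : List (List Char)) :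
    List.foldl (fun hits line => if p line = true then hits ++ [line] else hits) [] l
      = List.filter p l := by
  simpa using PySem.List.foldl_append_if p id l []

-- the filtered-reversed-joined search of A, as an existential over the lines
theorem pvJoin_filter_iff {w v : List Char} (hv : (' ' : Char) ∉ v) (hvne : v ≠ [])
    (lines : List (List Char)) :
    v <:+: PySem.Chars.join [' ']
        (List.filter (fun line => PySem.Chars.isIn w line) lines.reverse) ↔
      ∃ line ∈ lines, w <:+: line ∧ v <:+: line := by
  rw [pvInfix_join_iff hv hvne]
  constructor
  · rintro ⟨p, hp, hvp⟩
    rw [List.mem_filter, List.mem_reverse] at hp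
    exact ⟨p, hp.1, (PySem.Chars.isIn_iff_infix _ _).mp hp.2, hvp⟩
  · rintro ⟨p, hp, hwp, hvp⟩
    exact ⟨p, List.mem_filter.mpr ⟨List.mem_reverse.mpr hp,
      (PySem.Chars.isIn_iff_infix _ _).mpr hwp⟩, hvp⟩

-- ===== VERDICT (by name: the statement is the Claim_ definition above) =====
theorem has_attribute_or_import_error_spec : Claim_equal_has_attribute_or_import_error := by
  intro log_before _
  unfold Spec_has_attribute_or_import_error
  unfold has_attribute_or_import_error has_attribute_or_import_error_alt pvGetLinesWithWord
  simp only [pvLower_idem, PySem.List.slice?_none_none_neg_one, Option.getD_some,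
    pvFoldl_filter,
    show (" ".toList : List Char) = [' '] from rfl,
    show PySem.Chars.lower "attribute".toList = "attribute".toList from rfl,
    show PySem.Chars.lower "import".toList = "import".toList from rfl]
  set L := PySem.Chars.lower log_before.toList with hL
  set lines := PySem.Chars.splitOn L ['\n'] with hlines
  rw [Bool.eq_iff_iff]
  have hattr : ("attribute".toList ≠ ([] : List Char)) := by decide
  have himp : ("import".toList ≠ ([] : List Char)) := by decide
  have herr : ("error".toList ≠ ([] : List Char)) := by decide
  have hfail : ("fail".toList ≠ ([] : List Char)) := by decide
  have hattrn : ('\n' : Char) ∉ "attribute".toList := by decide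
  have himpn : ('\n' : Char) ∉ "import".toList := by decide
  have herrs : (' ' : Char) ∉ "error".toList := by decide
  have hfails : (' ' : Char) ∉ "fail".toList := by decide
  constructor
  · -- A → B
    intro hA
    rw [List.any_eq_true]
    split at hA
    · split at hA
      · next hinner =>
        simp only [List.map_cons, List.map_nil, List.any_cons, List.any_nil, id_eq,
          Bool.or_false, Bool.or_eq_true] at hinner
        rcases hinner with (hb | hb) | (hb | hb)
        · rw [PySem.Chars.isIn_iff_infix, pvJoin_filter_iff herrs herr] at hb
          obtain ⟨line, hline, hw2, hv2⟩ := hb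
          refine ⟨line, hline, ?_⟩
          simp only [Bool.and_eq_true, Bool.or_eq_true, PySem.Chars.isIn_iff_infix]
          exact ⟨Or.inl hw2, Or.inl hv2⟩
        · rw [PySem.Chars.isIn_iff_infix, pvJoin_filter_iff herrs herr] at hb
          obtain ⟨line, hline, hw2, hv2⟩ := hb
          refine ⟨line, hline, ?_⟩
          simp only [Bool.and_eq_true, Bool.or_eq_true, PySem.Chars.isIn_iff_infix]
          exact ⟨Or.inr hw2, Or.inl hv2⟩
        · rw [PySem.Chars.isIn_iff_infix, pvJoin_filter_iff hfails hfail] at hb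
          obtain ⟨line, hline, hw2, hv2⟩ := hb
          refine ⟨line, hline, ?_⟩
          simp only [Bool.and_eq_true, Bool.or_eq_true, PySem.Chars.isIn_iff_infix]
          exact ⟨Or.inl hw2, Or.inr hv2⟩
        · rw [PySem.Chars.isIn_iff_infix, pvJoin_filter_iff hfails hfail] at hb
          obtain ⟨line, hline, hw2, hv2⟩ := hb
          refine ⟨line, hline, ?_⟩
          simp only [Bool.and_eq_true, Bool.or_eq_true, PySem.Chars.isIn_iff_infix]
          exact ⟨Or.inr hw2, Or.inr hv2⟩
      · exact absurd hA (by simp)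
    · exact absurd hA (by simp)
  · -- B → A
    intro hB
    rw [List.any_eq_true] at hB
    obtain ⟨line, hline, hpred⟩ := hB
    simp only [Bool.and_eq_true, Bool.or_eq_true, PySem.Chars.isIn_iff_infix] at hpred
    obtain ⟨hword, hsev⟩ := hpred
    split
    · split
      · rfl
      · next hinner =>
        exfalso
        apply hinner
        simp only [List.map_cons, List.map_nil, List.any_cons, List.any_nil, id_eq,
          Bool.or_false, Bool.or_eq_true]
        rcases hsev with hv2 | hv2
        · left
          rcases hword with hw2 | hw2
          · left
            rw [PySem.Chars.isIn_iff_infix, pvJoin_filter_iff herrs herr]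
            exact ⟨line, hline, hw2, hv2⟩
          · right
            rw [PySem.Chars.isIn_iff_infix, pvJoin_filter_iff herrs herr]
            exact ⟨line, hline, hw2, hv2⟩
        · right
          rcases hword with hw2 | hw2
          · left
            rw [PySem.Chars.isIn_iff_infix, pvJoin_filter_iff hfails hfail]
            exact ⟨line, hline, hw2, hv2⟩
          · right
            rw [PySem.Chars.isIn_iff_infix, pvJoin_filter_iff hfails hfail]
            exact ⟨line, hline, hw2, hv2⟩
    · next hcond =>
      exfalso
      apply hcond
      simp only [List.any_cons, List.any_nil, id_eq, Bool.or_false, Bool.or_eq_true]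
      rcases hword with h | h
      · exact Or.inl ((PySem.Chars.isIn_iff_infix _ _).mpr
          ((pvInfix_iff_exists_line hattrn hattr L).mpr ⟨line, hline, h⟩))
      · exact Or.inr ((PySem.Chars.isIn_iff_infix _ _).mpr
          ((pvInfix_iff_exists_line himpn himp L).mpr ⟨line, hline, h⟩))
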